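-- pv_equiv track=rewrite | github.com/jiturbide/python | interview/Metacareers/strings/matchingPairs.py | matching_pairs_1
-- ===== SOURCE A (Python) =====
-- def matching_pairs_1(s, t):
--   # inneficient
--   matchingPairs = 0
--   list_s = list(s)
--
--   for i in range(len(s)-1):
--     for j in range(i+1, len(s)):
--       tmp = list_s[i]
--       list_s[i] = list_s[j]
--       list_s[j] = tmp
--       matching = 0
--       for k in range(len(s)):
--         if list_s[k] == t[k]:
--           matching += 1
--
--       if matching > matchingPairs:
--         matchingPairs = matching
--
--       list_s[j] = list_s[i]
--       list_s[i] = tmp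
--
--   return matchingPairs
-- ===== SOURCE B (Python) =====
-- def matching_pairs_1(s, t):
--     n = len(s)
--     if n < 2:
--         return 0
--     base = 0
--     for k in range(n):
--         if s[k] == t[k]:
--             base += 1
--     best = 0
--     for i in range(n - 1):
--         for j in range(i + 1, n):
--             delta = ((s[j] == t[i]) + (s[i] == t[j])
--                      - (s[i] == t[i]) - (s[j] == t[j]))
--             if base + delta > best:
--                 best = base + delta
--     return best
-- ===== Notes on version B (the rewrite author's own statement) =====
-- stated objective: faster
-- what changed: B precomputes the base match count once and evaluates each candidate swap with an O(1) arithmetic delta (no list copy, mutation or per-swap re-count), replacing A's O(n) re-counting loop inside the pair scan.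
import Mathlib
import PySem

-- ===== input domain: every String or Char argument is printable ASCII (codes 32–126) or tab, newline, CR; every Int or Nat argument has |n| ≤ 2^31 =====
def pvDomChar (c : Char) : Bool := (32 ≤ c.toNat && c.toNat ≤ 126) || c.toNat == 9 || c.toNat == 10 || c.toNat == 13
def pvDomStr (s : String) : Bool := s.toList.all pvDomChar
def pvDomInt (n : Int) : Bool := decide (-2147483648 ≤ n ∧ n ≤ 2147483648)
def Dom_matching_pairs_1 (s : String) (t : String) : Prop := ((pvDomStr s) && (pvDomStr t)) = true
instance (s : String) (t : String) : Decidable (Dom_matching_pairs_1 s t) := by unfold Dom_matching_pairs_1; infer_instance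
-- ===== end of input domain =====

-- B replaces A's O(n) re-count of matches after every trial swap by a precomputed
-- base match count plus an O(1) delta per pair (no list mutation): O(n^2) vs A's O(n^3).

-- ===== PORT A =====
-- inner counting loop of A: 'for k in range(len(s)): if list_s[k] == t[k]: matching += 1'
def aCount (tl : List Char) (n : Int) (l : List Char) : Int :=
  (PySem.List.pyRange 0 n 1).foldl
    (fun (m : Int) k => if PySem.List.pyGetD l k ' ' == PySem.List.pyGetD tl k ' ' then m + 1 else m) 0

-- body of A's inner 'for j' loop: swap, re-count, update max, swap back
def aStep (tl : List Char) (n i : Int) (st : Int × List Char) (j : Int) : Int × List Char :=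
  let best := st.1
  let l := st.2
  let tmp := PySem.List.pyGetD l i ' '
  let l := PySem.List.pySetD l i (PySem.List.pyGetD l j ' ')
  let l := PySem.List.pySetD l j tmp
  let matching := aCount tl n l
  let best := if matching > best then matching else best
  let l := PySem.List.pySetD l j (PySem.List.pyGetD l i ' ')
  let l := PySem.List.pySetD l i tmp
  (best, l)

def matching_pairs_1 (s : String) (t : String) : Int :=
  let list_s := s.toList
  let tl := t.toList
  let n : Int := (list_s.length : Int)
  ((PySem.List.pyRange 0 (n - 1) 1).foldl
      (fun (st : Int × List Char) i => (PySem.List.pyRange (i + 1) n 1).foldl (aStep tl n i) st)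
      (0, list_s)).1

-- ===== PORT B =====
-- delta of the base match count caused by swapping positions i and j
def bDelta (ls tl : List Char) (i j : Int) : Int :=
  (if PySem.List.pyGetD ls j ' ' == PySem.List.pyGetD tl i ' ' then (1 : Int) else 0)
  + (if PySem.List.pyGetD ls i ' ' == PySem.List.pyGetD tl j ' ' then (1 : Int) else 0)
  - (if PySem.List.pyGetD ls i ' ' == PySem.List.pyGetD tl i ' ' then (1 : Int) else 0)
  - (if PySem.List.pyGetD ls j ' ' == PySem.List.pyGetD tl j ' ' then (1 : Int) else 0)

-- body of B's inner 'for j' loop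
def bStep (ls tl : List Char) (base i : Int) (best : Int) (j : Int) : Int :=
  let delta := bDelta ls tl i j
  if base + delta > best then base + delta else best

def matching_pairs_1_alt (s : String) (t : String) : Int :=
  let ls := s.toList
  let tl := t.toList
  let n : Int := (ls.length : Int)
  if n < 2 then 0
  else
    let base :=
      (PySem.List.pyRange 0 n 1).foldl
        (fun (b : Int) k => if PySem.List.pyGetD ls k ' ' == PySem.List.pyGetD tl k ' ' then b + 1 else b) 0
    (PySem.List.pyRange 0 (n - 1) 1).foldl
      (fun (best : Int) i => (PySem.List.pyRange (i + 1) n 1).foldl (bStep ls tl base i) best)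
      0

-- ===== PRECONDITION & SPEC =====
-- Python A indexes t[k] for every k < len(s) once len(s) ≥ 2, so it raises IndexError
-- when t is shorter than s (and s has at least 2 characters); exactly those inputs are excluded.
def Pre_matching_pairs_1 (s : String) (t : String) : Prop :=
  s.toList.length ≤ t.toList.length ∨ s.toList.length < 2
instance (s : String) (t : String) : Decidable (Pre_matching_pairs_1 s t) := by
  unfold Pre_matching_pairs_1; infer_instance

def pvWitness_matching_pairs_1 : String × String := ("abc", "acb")

def Spec_matching_pairs_1 (s : String) (t : String) (out : Int) : Prop := out = matching_pairs_1_alt s t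
instance (s : String) (t : String) (out : Int) : Decidable (Spec_matching_pairs_1 s t out) := by
  unfold Spec_matching_pairs_1; infer_instance

-- ===== CLAIM (what is proved, stated in full; the proofs are below) =====
def Claim_equal_matching_pairs_1 : Prop := ∀ (s : String) (t : String), Dom_matching_pairs_1 s t → Pre_matching_pairs_1 s t → Spec_matching_pairs_1 s t (matching_pairs_1 s t)

-- ===== LEMMAS AND PROOFS =====

theorem pvWitness_ok :
    Dom_matching_pairs_1 (pvWitness_matching_pairs_1.1) (pvWitness_matching_pairs_1.2) ∧
    Pre_matching_pairs_1 (pvWitness_matching_pairs_1.1) (pvWitness_matching_pairs_1.2) := by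
  exact ⟨by decide, by decide⟩

-- a 0/1 counting foldl over List.range as a Finset sum
theorem foldl_if_sum (p : Nat → Bool) (n : Nat) (c : Int) :
    (List.range n).foldl (fun (m : Int) k => if p k then m + 1 else m) c
      = c + ∑ k ∈ Finset.range n, (if p k then (1 : Int) else 0) := by
  induction n with
  | zero => simp
  | succ n ih =>
      rw [List.range_succ, List.foldl_append, Finset.sum_range_succ]
      by_cases h : p n
      · rw [ih]; simp [h]; ring
      · rw [ih]; simp [h]

theorem aCount_eq_sum (tl l : List Char) (n : Nat) :
    aCount tl (n : Int) l
      = ∑ k ∈ Finset.range n, (if l.getD k ' ' == tl.getD k ' ' then (1 : Int) else 0) := by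
  unfold aCount
  rw [PySem.List.pyRange_zero_nat, List.foldl_map]
  simp only [PySem.List.pyGetD_natCast]
  exact (foldl_if_sum (fun k => l.getD k ' ' == tl.getD k ' ') n 0).trans (zero_add _)

-- a sum over range n where f and g differ only at two indices a ≠ b
theorem sum_diff_two {n a b : Nat} (f g : Nat → Int) (ha : a < n) (hb : b < n) (hab : a ≠ b)
    (h : ∀ k, k ≠ a → k ≠ b → f k = g k) :
    ∑ k ∈ Finset.range n, f k
      = (∑ k ∈ Finset.range n, g k) - g a - g b + f a + f b := by
  have hA : a ∈ Finset.range n := Finset.mem_range.2 ha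
  have hB : b ∈ (Finset.range n).erase a :=
    Finset.mem_erase.2 ⟨Ne.symm hab, Finset.mem_range.2 hb⟩
  rw [← Finset.add_sum_erase _ f hA, ← Finset.add_sum_erase _ f hB,
      ← Finset.add_sum_erase _ g hA, ← Finset.add_sum_erase _ g hB]
  have hcong : ∑ k ∈ ((Finset.range n).erase a).erase b, f k
      = ∑ k ∈ ((Finset.range n).erase a).erase b, g k := by
    refine Finset.sum_congr rfl (fun k hk => ?_)
    have h1 := (Finset.mem_erase.1 hk).1
    have h2 := (Finset.mem_erase.1 (Finset.mem_erase.1 hk).2).1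
    exact h k h2 h1
  rw [hcong]; ring

-- getD of a double set, at the four kinds of positions
theorem getD_swap_at (ls : List Char) (a b k : Nat) (ha : a < ls.length) (hb : b < ls.length)
    (hab : a ≠ b) :
    ((ls.set a (ls.getD b ' ')).set b (ls.getD a ' ')).getD k ' '
      = if k = b then ls.getD a ' ' else if k = a then ls.getD b ' ' else ls.getD k ' ' := by
  simp only [List.getD_eq_getElem?_getD, List.getElem?_set, List.length_set]
  rcases eq_or_ne k b with rfl | hkb
  · simp [hb]
  · rcases eq_or_ne k a with rfl | hka
    · simp [Ne.symm hkb, ha, hab]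
    · simp [hka, hkb, Ne.symm hka, Ne.symm hkb]

-- undoing the swap restores the original list
theorem set_restore (ls : List Char) (a b : Nat) (ha : a < ls.length) (hb : b < ls.length)
    (hab : a ≠ b) :
    ((((ls.set a (ls.getD b ' ')).set b (ls.getD a ' ')).set b
        (((ls.set a (ls.getD b ' ')).set b (ls.getD a ' ')).getD a ' ')).set a (ls.getD a ' '))
      = ls := by
  have h1 : ((ls.set a (ls.getD b ' ')).set b (ls.getD a ' ')).getD a ' ' = ls.getD b ' ' := by
    rw [getD_swap_at ls a b a ha hb hab]; simp [hab]
  rw [h1, List.set_set]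
  apply List.ext_getElem?
  intro k
  simp only [List.getElem?_set, List.length_set, List.getD_eq_getElem?_getD]
  rcases eq_or_ne a k with rfl | hak
  · simp [ha]
  · rcases eq_or_ne b k with rfl | hbk
    · simp [hak, hb]
    · simp [hak, hbk]

-- one inner-loop step of A equals one inner-loop step of B (and restores the list)
theorem step_eq (ls tl : List Char) (i j : Int) (hi : 0 ≤ i) (hij : i < j)
    (hj : j < (ls.length : Int)) (best : Int) :
    aStep tl (ls.length : Int) i (best, ls) j
      = (bStep ls tl (aCount tl (ls.length : Int) ls) i best j, ls) := by
  obtain ⟨a, rfl⟩ : ∃ a : Nat, i = (a : Int) := ⟨i.toNat, (Int.toNat_of_nonneg hi).symm⟩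
  obtain ⟨b, rfl⟩ : ∃ b : Nat, j = (b : Int) := ⟨j.toNat, (Int.toNat_of_nonneg (le_of_lt (lt_of_le_of_lt hi hij))).symm⟩
  have hab : a < b := by exact_mod_cast hij
  have hbn : b < ls.length := by exact_mod_cast hj
  have han : a < ls.length := lt_trans hab hbn
  have hne : a ≠ b := Nat.ne_of_lt hab
  unfold aStep bStep
  simp only [PySem.List.pyGetD_natCast, PySem.List.pySetD_natCast]
  have hrest := set_restore ls a b han hbn hne
  have hcount :
      aCount tl (ls.length : Int) ((ls.set a (ls.getD b ' ')).set b (ls.getD a ' '))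
        = aCount tl (ls.length : Int) ls + bDelta ls tl (a : Int) (b : Int) := by
    rw [aCount_eq_sum, aCount_eq_sum]
    rw [sum_diff_two
        (f := fun k => if ((ls.set a (ls.getD b ' ')).set b (ls.getD a ' ')).getD k ' ' == tl.getD k ' ' then (1 : Int) else 0)
        (g := fun k => if ls.getD k ' ' == tl.getD k ' ' then (1 : Int) else 0)
        han hbn hne
        (fun k hka hkb => by simp [Ne.symm hka, Ne.symm hkb])]
    have ea : ((ls.set a (ls.getD b ' ')).set b (ls.getD a ' ')).getD a ' ' = ls.getD b ' ' := by
      rw [getD_swap_at ls a b a han hbn hne]; simp [hne]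
    have eb : ((ls.set a (ls.getD b ' ')).set b (ls.getD a ' ')).getD b ' ' = ls.getD a ' ' := by
      rw [getD_swap_at ls a b b han hbn hne]; simp
    rw [ea, eb]
    unfold bDelta
    simp only [PySem.List.pyGetD_natCast]
    ring
  rw [hcount, hrest]

-- A's inner loop over any list of valid j's equals B's, with the list restored
theorem inner_eq (ls tl : List Char) (i : Int) (hi : 0 ≤ i) (js : List Int)
    (hjs : ∀ j ∈ js, i < j ∧ j < (ls.length : Int)) (best : Int) :
    js.foldl (aStep tl (ls.length : Int) i) (best, ls)
      = (js.foldl (bStep ls tl (aCount tl (ls.length : Int) ls) i) best, ls) := by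
  induction js generalizing best with
  | nil => rfl
  | cons j js ih =>
      have hj := hjs j (List.mem_cons_self)
      rw [List.foldl_cons, List.foldl_cons, step_eq ls tl i j hi hj.1 hj.2 best]
      exact ih (fun j hj => hjs j (List.mem_cons_of_mem _ hj)) _

-- A's outer loop equals B's outer loop
theorem outer_eq (ls tl : List Char) (is : List Int) (his : ∀ i ∈ is, 0 ≤ i) (best : Int) :
    (is.foldl
        (fun (st : Int × List Char) i =>
          (PySem.List.pyRange (i + 1) (ls.length : Int) 1).foldl (aStep tl (ls.length : Int) i) st)
        (best, ls))
      = (is.foldl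
          (fun (b : Int) i =>
            (PySem.List.pyRange (i + 1) (ls.length : Int) 1).foldl
              (bStep ls tl (aCount tl (ls.length : Int) ls) i) b)
          best, ls) := by
  induction is generalizing best with
  | nil => rfl
  | cons i is ih =>
      have hi := his i (List.mem_cons_self)
      rw [List.foldl_cons, List.foldl_cons,
        inner_eq ls tl i hi _ (fun j hj => by
          have := PySem.List.mem_pyRange_one.1 hj
          exact ⟨by omega, this.2⟩) best]
      exact ih (fun i hi => his i (List.mem_cons_of_mem _ hi)) _

-- ===== VERDICT (by name: the statement is the Claim_ definition above) =====
theorem matching_pairs_1_spec : Claim_equal_matching_pairs_1 := by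
  intro s t _ _
  unfold Spec_matching_pairs_1 matching_pairs_1 matching_pairs_1_alt
  simp only []
  by_cases hn : ((s.toList.length : Int) < 2)
  · have : PySem.List.pyRange 0 ((s.toList.length : Int) - 1) 1 = [] :=
      PySem.List.pyRange_one_eq_nil (by omega)
    simp only [this, List.foldl_nil, if_pos hn]
  · rw [if_neg hn]
    have hbase :
        (PySem.List.pyRange 0 ((s.toList.length : Int)) 1).foldl
          (fun (b : Int) k =>
            if PySem.List.pyGetD s.toList k ' ' == PySem.List.pyGetD t.toList k ' ' then b + 1 else b) 0
          = aCount t.toList ((s.toList.length : Int)) s.toList := rfl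
    rw [hbase,
      outer_eq s.toList t.toList _ (fun i hi => (PySem.List.mem_pyRange_one.1 hi).1) 0]
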